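-- pv_equiv track=rewrite | github.com/oisin1001/Kattis | juryjeoprady.py | convert
-- ===== SOURCE A (Python) =====
-- def convert(directions):
--     result = ""
--     face = ["R", "D", "L", "U"]
--     facing = 0
--
--     for letter in directions:
--         if letter == "F":
--             result += face[facing]
--         if letter == "R":
--             facing = (facing + 1) % 4
--             result += face[facing]
--         if letter == "B":
--             facing = (facing + 2) % 4
--             result += face[facing]
--         if letter == "L":
--             facing = (facing + 3) % 4
--             result += face[facing]
--     return result
-- ===== SOURCE B (Python) =====
-- def convert(directions):
--     face = "RDLU"
--     inc = {"F": 0, "R": 1, "B": 2, "L": 3}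
--
--     def go(s):
--         # returns (output assuming initial facing 0, net rotation mod 4)
--         if len(s) <= 1:
--             if s in inc:
--                 k = inc[s]
--                 return face[k], k
--             return "", 0
--         mid = len(s) // 2
--         out_l, rot_l = go(s[:mid])
--         out_r, rot_r = go(s[mid:])
--         shifted = "".join(face[(face.index(ch) + rot_l) % 4] for ch in out_r)
--         return out_l + shifted, (rot_l + rot_r) % 4
--
--     return go(directions)[0]
-- ===== Notes on version B (the rewrite author's own statement) =====
-- stated objective: alternative
-- what changed: Replaces A's single stateful left-to-right loop (four if-branches updating a modular facing and growing the result by concatenation) with a divide-and-conquer: each half of the string is converted independently starting from facing 0, the right half's output letters are then re-labelled by the left half's net rotation, and the two outputs are concatenated; correct because each output letter is face[prefix-sum mod 4] and rotating the start shifts every letter uniformly.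
import Mathlib
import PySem

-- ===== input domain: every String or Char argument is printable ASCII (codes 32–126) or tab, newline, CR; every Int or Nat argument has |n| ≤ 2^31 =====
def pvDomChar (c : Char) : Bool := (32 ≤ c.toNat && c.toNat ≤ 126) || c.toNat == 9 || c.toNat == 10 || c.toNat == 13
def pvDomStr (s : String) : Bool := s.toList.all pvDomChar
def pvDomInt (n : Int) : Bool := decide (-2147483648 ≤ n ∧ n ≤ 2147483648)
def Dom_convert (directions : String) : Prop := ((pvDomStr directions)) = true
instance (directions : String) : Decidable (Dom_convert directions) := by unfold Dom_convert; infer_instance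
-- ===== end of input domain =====

-- B replaces A's single stateful left-to-right loop by a divide-and-conquer: each half
-- is converted independently (starting from facing 0) and the right half's output is
-- re-labelled by the left half's net rotation (objective: alternative, same value).

-- ===== PORT A =====
-- A builds `result` by string concatenation; it is ported as a growing List Char
-- joined once at the end (String.append is opaque to the kernel). face[facing] is
-- ported with pyGetD; the index is always in [0,4), so the default is never hit.
def pvFace : List Char := ['R', 'D', 'L', 'U']

-- one iteration of A's for-loop: the four independent `if` statements in order
def convStep (s : List Char × Int) (c : Char) : List Char × Int :=
  let s := if c = 'F' then (s.1 ++ [PySem.List.pyGetD pvFace s.2 ' '], s.2) else s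
  let s := if c = 'R' then
      let f := PySem.Int.mod (s.2 + 1) 4
      (s.1 ++ [PySem.List.pyGetD pvFace f ' '], f)
    else s
  let s := if c = 'B' then
      let f := PySem.Int.mod (s.2 + 2) 4
      (s.1 ++ [PySem.List.pyGetD pvFace f ' '], f)
    else s
  let s := if c = 'L' then
      let f := PySem.Int.mod (s.2 + 3) 4
      (s.1 ++ [PySem.List.pyGetD pvFace f ' '], f)
    else s
  s

def convert (directions : String) : String :=
  String.mk (directions.toList.foldl convStep ([], 0)).1

-- ===== PORT B =====
-- `s in inc` together with `k = inc[s]`: the rotation increment of a recognized letter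
def pvInc? (c : Char) : Option Int :=
  if c = 'F' then some 0
  else if c = 'R' then some 1
  else if c = 'B' then some 2
  else if c = 'L' then some 3
  else none

-- face[(face.index(ch) + r) % 4]; ch is always a face letter, so index's default 0 is never hit
def pvShift (r : Int) (ch : Char) : Char :=
  PySem.List.pyGetD pvFace
    (PySem.Int.mod (((PySem.List.index? pvFace ch).getD 0 : Int) + r) 4) ' '

-- Source B's recursive go: (output assuming initial facing 0, net rotation mod 4)
def pvGo (s : List Char) : List Char × Int :=
  if s.length ≤ 1 then
    match s with
    | [c] =>
      match pvInc? c with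
      | some k => ([PySem.List.pyGetD pvFace k ' '], k)
      | none => ([], 0)
    | _ => ([], 0)
  else
    let mid := s.length / 2
    let l := pvGo (s.take mid)
    let r := pvGo (s.drop mid)
    (l.1 ++ r.1.map (pvShift l.2), PySem.Int.mod (l.2 + r.2) 4)
termination_by s.length
decreasing_by
  · simp only [List.length_take]; omega
  · simp only [List.length_drop]; omega

def convert_alt (directions : String) : String :=
  String.mk (pvGo directions.toList).1

-- ===== PRECONDITION & SPEC =====
def Spec_convert (directions : String) (out : String) : Prop := out = convert_alt directions
instance (directions : String) (out : String) : Decidable (Spec_convert directions out) := by unfold Spec_convert; infer_instance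

-- ===== CLAIM (what is proved, stated in full; the proofs are below) =====
def Claim_equal_convert : Prop := ∀ (directions : String), Dom_convert directions → Spec_convert directions (convert directions)

-- ===== LEMMAS AND PROOFS =====

-- proof-side canonical form: the output is face[t % 4] at each running sum t of increments
def pvRunning : Int → List Int → List Int
  | _, [] => []
  | r, v :: vs => (r + v) :: pvRunning (r + v) vs

def pvFaceAt (t : Int) : Char :=
  PySem.List.pyGetD pvFace (PySem.Int.mod t 4) ' '

def pvCanon (t : Int) (cs : List Char) : List Char :=
  (pvRunning t (cs.filterMap pvInc?)).map pvFaceAt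

-- mod commutes with adding an increment
lemma pv_mod_shift (t k : Int) :
    PySem.Int.mod (PySem.Int.mod t 4 + k) 4 = PySem.Int.mod (t + k) 4 := by
  simp [PySem.Int.mod, Int.fmod_eq_emod]

lemma pv_mod_idem (t : Int) :
    PySem.Int.mod (PySem.Int.mod t 4) 4 = PySem.Int.mod t 4 := by
  have h := pv_mod_shift t 0
  simp only [add_zero] at h
  exact h

-- ---- A's loop equals the canonical form ----
lemma pv_step_F (res : List Char) (m : Int) :
    convStep (res, m) 'F' = (res ++ [PySem.List.pyGetD pvFace m ' '], m) := by
  simp [convStep]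

lemma pv_step_R (res : List Char) (m : Int) :
    convStep (res, m) 'R' =
      (res ++ [PySem.List.pyGetD pvFace (PySem.Int.mod (m + 1) 4) ' '],
       PySem.Int.mod (m + 1) 4) := by
  simp [convStep]

lemma pv_step_B (res : List Char) (m : Int) :
    convStep (res, m) 'B' =
      (res ++ [PySem.List.pyGetD pvFace (PySem.Int.mod (m + 2) 4) ' '],
       PySem.Int.mod (m + 2) 4) := by
  simp [convStep]

lemma pv_step_L (res : List Char) (m : Int) :
    convStep (res, m) 'L' =
      (res ++ [PySem.List.pyGetD pvFace (PySem.Int.mod (m + 3) 4) ' '],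
       PySem.Int.mod (m + 3) 4) := by
  simp [convStep]

lemma pv_step_other (s : List Char × Int) (c : Char) (h : pvInc? c = none) :
    convStep s c = s := by
  simp only [pvInc?] at h
  split_ifs at h
  simp_all [convStep]

-- loop invariant: starting A's loop at facing = t % 4 appends exactly pvCanon t
lemma pv_loop_eq (cs : List Char) : ∀ (res : List Char) (t : Int),
    (cs.foldl convStep (res, PySem.Int.mod t 4)).1 = res ++ pvCanon t cs := by
  induction cs with
  | nil => intro res t; simp [pvCanon, pvRunning]
  | cons c cs ih =>
    intro res t
    by_cases hF : c = 'F'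
    · subst hF
      simp only [List.foldl_cons, pv_step_F]
      show _ = res ++ pvCanon t ('F' :: cs)
      simp only [pvCanon, List.filterMap_cons, show pvInc? 'F' = some 0 from rfl,
        pvRunning, List.map_cons]
      rw [show t + 0 = t by ring, show (pvFaceAt t)
        = PySem.List.pyGetD pvFace (PySem.Int.mod t 4) ' ' from rfl]
      rw [ih (res ++ [PySem.List.pyGetD pvFace (PySem.Int.mod t 4) ' ']) t]
      simp [pvCanon]
    · by_cases hR : c = 'R'
      · subst hR
        simp only [List.foldl_cons, pv_step_R, pv_mod_shift]
        simp only [pvCanon, List.filterMap_cons, show pvInc? 'R' = some 1 from rfl,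
          pvRunning, List.map_cons]
        rw [show (pvFaceAt (t + 1))
          = PySem.List.pyGetD pvFace (PySem.Int.mod (t + 1) 4) ' ' from rfl]
        rw [ih (res ++ [PySem.List.pyGetD pvFace (PySem.Int.mod (t + 1) 4) ' ']) (t + 1)]
        simp [pvCanon]
      · by_cases hB : c = 'B'
        · subst hB
          simp only [List.foldl_cons, pv_step_B, pv_mod_shift]
          simp only [pvCanon, List.filterMap_cons, show pvInc? 'B' = some 2 from rfl,
            pvRunning, List.map_cons]
          rw [show (pvFaceAt (t + 2))
            = PySem.List.pyGetD pvFace (PySem.Int.mod (t + 2) 4) ' ' from rfl]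
          rw [ih (res ++ [PySem.List.pyGetD pvFace (PySem.Int.mod (t + 2) 4) ' ']) (t + 2)]
          simp [pvCanon]
        · by_cases hL : c = 'L'
          · subst hL
            simp only [List.foldl_cons, pv_step_L, pv_mod_shift]
            simp only [pvCanon, List.filterMap_cons, show pvInc? 'L' = some 3 from rfl,
              pvRunning, List.map_cons]
            rw [show (pvFaceAt (t + 3))
              = PySem.List.pyGetD pvFace (PySem.Int.mod (t + 3) 4) ' ' from rfl]
            rw [ih (res ++ [PySem.List.pyGetD pvFace (PySem.Int.mod (t + 3) 4) ' ']) (t + 3)]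
            simp [pvCanon]
          · have hnone : pvInc? c = none := by
              simp [pvInc?, hF, hR, hB, hL]
            simp only [List.foldl_cons, pv_step_other _ _ hnone]
            rw [ih res t]
            simp [pvCanon, hnone]

-- ---- B's divide-and-conquer equals the canonical form ----

-- the canonical form only depends on the starting point mod 4
lemma pv_canon_mod (cs : List Char) : ∀ t t' : Int,
    PySem.Int.mod t 4 = PySem.Int.mod t' 4 → pvCanon t cs = pvCanon t' cs := by
  suffices h : ∀ (vs : List Int) (t t' : Int), PySem.Int.mod t 4 = PySem.Int.mod t' 4 →
      (pvRunning t vs).map pvFaceAt = (pvRunning t' vs).map pvFaceAt by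
    intro t t' ht; exact h _ t t' ht
  intro vs
  induction vs with
  | nil => intro t t' _; simp [pvRunning]
  | cons v vs ih =>
    intro t t' ht
    have hm : PySem.Int.mod (t + v) 4 = PySem.Int.mod (t' + v) 4 := by
      rw [← pv_mod_shift t v, ht, pv_mod_shift]
    simp only [pvRunning, List.map_cons]
    rw [ih _ _ hm, show pvFaceAt (t + v) = pvFaceAt (t' + v) by unfold pvFaceAt; rw [hm]]

-- shifting the letters of a canonical output rotates its starting point
lemma pv_shift_faceAt (r u : Int) : pvShift r (pvFaceAt u) = pvFaceAt (u + r) := by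
  have h0 : 0 ≤ PySem.Int.mod u 4 := PySem.Int.mod_nonneg u (by norm_num)
  have h4 : PySem.Int.mod u 4 < 4 := PySem.Int.mod_lt u (by norm_num)
  have hidx : ((PySem.List.index? pvFace (pvFaceAt u)).getD 0 : Int) = PySem.Int.mod u 4 := by
    unfold pvFaceAt
    interval_cases h : (PySem.Int.mod u 4) <;> simp_all <;> decide
  unfold pvShift
  rw [hidx, pv_mod_shift]
  rfl

lemma pv_map_shift_canon (r : Int) (cs : List Char) :
    (pvCanon 0 cs).map (pvShift r) = pvCanon r cs := by
  suffices h : ∀ (vs : List Int) (t : Int),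
      ((pvRunning t vs).map pvFaceAt).map (pvShift r) = (pvRunning (t + r) vs).map pvFaceAt by
    have := h (cs.filterMap pvInc?) 0
    simpa [pvCanon] using this
  intro vs
  induction vs with
  | nil => intro t; simp [pvRunning]
  | cons v vs ih =>
    intro t
    simp only [pvRunning, List.map_cons, pv_shift_faceAt]
    rw [ih (t + v)]
    ring_nf

-- splitting the input splits the canonical output
lemma pv_running_append (xs ys : List Int) : ∀ t : Int,
    pvRunning t (xs ++ ys) = pvRunning t xs ++ pvRunning (t + xs.sum) ys := by
  induction xs with
  | nil => intro t; simp [pvRunning]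
  | cons x xs ih =>
    intro t
    simp only [List.cons_append, pvRunning, ih (t + x), List.sum_cons]
    rw [show t + x + xs.sum = t + (x + xs.sum) by ring]

lemma pv_canon_append (l r : List Char) (t : Int) :
    pvCanon t (l ++ r) = pvCanon t l ++ pvCanon (t + (l.filterMap pvInc?).sum) r := by
  simp [pvCanon, List.filterMap_append, pv_running_append]

-- B's go computes the canonical output and the total rotation mod 4
lemma pv_go_spec : ∀ (n : ℕ) (s : List Char), s.length = n →
    pvGo s = (pvCanon 0 s, PySem.Int.mod (s.filterMap pvInc?).sum 4) := by
  intro n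
  induction n using Nat.strong_induction_on with
  | _ n ih =>
    intro s hn
    by_cases hlen : s.length ≤ 1
    · rcases s with _ | ⟨c, _ | ⟨d, tl⟩⟩
      · rw [pvGo]
        · simp [pvCanon, pvRunning, PySem.Int.mod, Int.fmod_eq_emod]
        · exact fun c h => by simp at h
      · rw [pvGo, if_pos hlen]
        cases hc : pvInc? c with
        | none => simp [pvCanon, pvRunning, hc, PySem.Int.mod, Int.fmod_eq_emod]
        | some k =>
          have hk : 0 ≤ k ∧ k < 4 := by
            simp only [pvInc?] at hc
            split_ifs at hc <;> simp_all <;> omega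
          have hmod : PySem.Int.mod k 4 = k := by
            simp only [PySem.Int.mod, Int.fmod_eq_emod]; omega
          have hmod' : k % 4 = k := by omega
          simp [pvCanon, pvRunning, pvFaceAt, hc]
          exact ⟨by rw [hmod'], hmod'.symm⟩
      · simp at hlen
    · rw [pvGo, if_neg hlen]
      · show ((pvGo (s.take (s.length / 2))).1 ++
              ((pvGo (s.drop (s.length / 2))).1.map (pvShift (pvGo (s.take (s.length / 2))).2)),
              PySem.Int.mod ((pvGo (s.take (s.length / 2))).2 + (pvGo (s.drop (s.length / 2))).2) 4)
            = (pvCanon 0 s, PySem.Int.mod (s.filterMap pvInc?).sum 4)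
        have hlt : (s.take (s.length / 2)).length < n := by
          simp only [List.length_take]; omega
        have hrt : (s.drop (s.length / 2)).length < n := by
          simp only [List.length_drop]; omega
        rw [ih _ hlt _ rfl, ih _ hrt _ rfl]
        have hsplit : s = s.take (s.length / 2) ++ s.drop (s.length / 2) :=
          (List.take_append_drop (s.length / 2) s).symm
        have hsum : (s.filterMap pvInc?).sum
            = ((s.take (s.length / 2)).filterMap pvInc?).sum
              + ((s.drop (s.length / 2)).filterMap pvInc?).sum := by
          conv_lhs => rw [hsplit]
          rw [List.filterMap_append, List.sum_append]
        simp only [Prod.mk.injEq]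
        constructor
        · -- outputs agree
          rw [pv_map_shift_canon]
          conv_rhs => rw [hsplit, pv_canon_append]
          rw [pv_canon_mod (s.drop (s.length / 2))
            (PySem.Int.mod ((s.take (s.length / 2)).filterMap pvInc?).sum 4)
            (0 + ((s.take (s.length / 2)).filterMap pvInc?).sum)
            (by rw [pv_mod_idem]; norm_num)]
        · -- rotations agree
          rw [hsum, pv_mod_shift, add_comm, pv_mod_shift, add_comm]
      · exact fun c h => by subst h; simp at hlen

-- ===== VERDICT (by name: the statement is the Claim_ definition above) =====
theorem convert_spec : Claim_equal_convert := by
  intro directions _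
  unfold Spec_convert convert convert_alt
  rw [pv_go_spec directions.toList.length directions.toList rfl]
  have h0 : (0 : Int) = PySem.Int.mod 0 4 := rfl
  rw [h0, pv_loop_eq directions.toList [] 0]
  simp
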